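-- pv_equiv track=rewrite | github.com/paras-a/Data-Structures-and-Algorithms | recursion.py | product_multiples_four
-- ===== SOURCE A (Python) =====
-- def product_multiples_four(n):
--     """
--     Calculate the product of numbers divisible by 4 from 1 to n using recursion.
--
--     @param n: A positive integer
--     @return: The product of numbers divisible by 4 from 1 to n
--     @rtype: int
--
--     Examples:
--         >>> product_multiples_four(8)
--         32
--         >>> product_multiples_four(3)
--         1
--     """
--     if n <= 0:
--         raise ValueError("n must be a positive integer")
--     if n == 1:
--         return n
--     product = 1
--     if n % 4 == 0:
--         product *= n
--     return product * product_multiples_four(n-1)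
-- ===== SOURCE B (Python) =====
-- def product_multiples_four(n):
--     if n <= 0:
--         raise ValueError("n must be a positive integer")
--     product = 1
--     k = 4
--     while k <= n:
--         product *= k
--         k += 4
--     return product
-- ===== Notes on version B (the rewrite author's own statement) =====
-- stated objective: idiomatic
-- what changed: Replaced the n-step recursion (one frame per integer, testing each for divisibility by 4) with an iterative while loop that walks only the multiples of 4 (k = 4, 8, ...) into a single accumulator.
import Mathlib
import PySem

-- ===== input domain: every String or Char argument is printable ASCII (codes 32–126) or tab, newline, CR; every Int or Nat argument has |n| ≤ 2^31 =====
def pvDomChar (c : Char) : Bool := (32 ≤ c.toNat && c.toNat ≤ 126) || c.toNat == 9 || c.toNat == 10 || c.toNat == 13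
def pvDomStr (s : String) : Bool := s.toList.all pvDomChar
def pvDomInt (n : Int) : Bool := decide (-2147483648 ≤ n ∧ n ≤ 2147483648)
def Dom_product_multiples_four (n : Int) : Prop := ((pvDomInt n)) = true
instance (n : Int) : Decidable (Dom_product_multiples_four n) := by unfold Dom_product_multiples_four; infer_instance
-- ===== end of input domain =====

-- B replaces A's per-integer recursion by a while loop over the multiples of 4 only (idiomatic single-accumulator pass).

-- ===== PORT A =====
-- literal port of A's recursion; n ≤ 0 (where Python raises ValueError) is excluded by Pre_ and returns 0 here.
def product_multiples_four (n : Int) : Int :=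
  if _h0 : n ≤ 0 then 0
  else if n = 1 then n
  else (if n % 4 = 0 then n else 1) * product_multiples_four (n - 1)
termination_by n.toNat
decreasing_by omega

-- ===== PORT B =====
-- the while loop of Source B: k walks 4, 8, … while k ≤ n, multiplying into product
def pmfLoop (n k product : Int) : Int :=
  if _h : k ≤ n then pmfLoop n (k + 4) (product * k) else product
termination_by (n + 1 - k).toNat
decreasing_by omega

def product_multiples_four_alt (n : Int) : Int :=
  if n ≤ 0 then 0 else pmfLoop n 4 1

-- ===== PRECONDITION & SPEC =====
-- Pre_ excludes exactly n ≤ 0, where the Python A raises ValueError.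
def Pre_product_multiples_four (n : Int) : Prop := 1 ≤ n
instance (n : Int) : Decidable (Pre_product_multiples_four n) := by unfold Pre_product_multiples_four; infer_instance
def pvWitness_product_multiples_four : Int := 8

def Spec_product_multiples_four (n : Int) (out : Int) : Prop := out = product_multiples_four_alt n
instance (n : Int) (out : Int) : Decidable (Spec_product_multiples_four n out) := by unfold Spec_product_multiples_four; infer_instance

-- ===== CLAIM (what is proved, stated in full; the proofs are below) =====
def Claim_equal_product_multiples_four : Prop := ∀ (n : Int), Dom_product_multiples_four n → Pre_product_multiples_four n → Spec_product_multiples_four n (product_multiples_four n)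

-- ===== LEMMAS AND PROOFS =====

-- peel the upper bound: with k a positive multiple of 4, the loop bounded by n
-- equals the loop bounded by n-1 times an extra factor n exactly when 4 ∣ n and k ≤ n.
theorem pmfLoop_peel (m : Nat) : ∀ (n k p : Int), (n + 1 - k).toNat ≤ m → k % 4 = 0 → 0 < k →
    pmfLoop n k p = if n % 4 = 0 ∧ k ≤ n then n * pmfLoop (n - 1) k p else pmfLoop (n - 1) k p := by
  induction m with
  | zero =>
    intro n k p hm hk4 hk
    have hkn : ¬ k ≤ n := by omega
    rw [pmfLoop, dif_neg hkn, if_neg (by tauto), pmfLoop, dif_neg (by omega : ¬ k ≤ n - 1)]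
  | succ m ih =>
    intro n k p hm hk4 hk
    by_cases hkn : k ≤ n
    · rw [pmfLoop, dif_pos hkn]
      by_cases hn4 : n % 4 = 0
      · rw [if_pos (And.intro hn4 hkn)]
        by_cases hkeq : k = n
        · subst hkeq
          rw [pmfLoop, dif_neg (by omega : ¬ k + 4 ≤ k), pmfLoop, dif_neg (by omega : ¬ k ≤ k - 1)]
          ring
        · have hklt : k + 4 ≤ n := by omega
          rw [ih n (k + 4) (p * k) (by omega) (by omega) (by omega)]
          rw [if_pos (And.intro hn4 hklt)]
          conv_rhs => rw [pmfLoop, dif_pos (by omega : k ≤ n - 1)]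
      · rw [if_neg (by tauto)]
        have hklt : k < n := by omega
        rw [ih n (k + 4) (p * k) (by omega) (by omega) (by omega)]
        rw [if_neg (by tauto)]
        conv_rhs => rw [pmfLoop, dif_pos (by omega : k ≤ n - 1)]
    · rw [pmfLoop, dif_neg hkn, if_neg (by tauto), pmfLoop, dif_neg (by omega : ¬ k ≤ n - 1)]

theorem main_eq (m : Nat) : ∀ (n : Int), n.toNat ≤ m → 1 ≤ n → product_multiples_four n = pmfLoop n 4 1 := by
  induction m with
  | zero => intro n hm h1; omega
  | succ m ih =>
    intro n hm h1
    rw [product_multiples_four, dif_neg (by omega : ¬ n ≤ 0)]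
    by_cases hn1 : n = 1
    · subst hn1
      rw [if_pos rfl, pmfLoop, dif_neg (by omega : ¬ (4 : Int) ≤ 1)]
    · rw [if_neg hn1, ih (n - 1) (by omega) (by omega)]
      rw [pmfLoop_peel ((n + 1 - 4).toNat) n 4 1 le_rfl (by decide) (by decide)]
      by_cases hn4 : n % 4 = 0
      · rw [if_pos hn4, if_pos (And.intro hn4 (by omega : (4 : Int) ≤ n))]
      · rw [if_neg hn4, if_neg (by tauto), one_mul]

-- ===== VERDICT (by name: the statement is the Claim_ definition above) =====
theorem product_multiples_four_spec : Claim_equal_product_multiples_four := by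
  intro n _ hpre
  have h1 : 1 ≤ n := hpre
  unfold Spec_product_multiples_four product_multiples_four_alt
  rw [if_neg (by omega : ¬ n ≤ 0)]
  exact main_eq n.toNat n le_rfl h1
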